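-- pv_equiv track=rewrite | github.com/MrBrantCode/unitest_baseline | mut_generate/mist_train_taco/taco_9399/solution.py | count_pairs_with_difference_less_than_k
-- ===== SOURCE A (Python) =====
-- def count_pairs_with_difference_less_than_k(arr, k):
--     arr.sort()
--     output = 0
--     j = 0
--     n = len(arr)
--
--     for i in range(n):
--         while j < n and arr[i] - arr[j] >= k:
--             j += 1
--         output += i - j
--
--     return output
-- ===== SOURCE B (Python) =====
-- def count_pairs_with_difference_less_than_k(arr, k):
--     arr.sort()
--     n = len(arr)
--     below = 0
--     for x in arr:
--         # count elements <= x - k by binary search over the sorted array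
--         lo, hi = 0, n
--         while lo < hi:
--             mid = (lo + hi) // 2
--             if arr[mid] <= x - k:
--                 lo = mid + 1
--             else:
--                 hi = mid
--         below += lo
--     return n * (n - 1) // 2 - below
-- ===== Notes on version B (the rewrite author's own statement) =====
-- stated objective: alternative
-- what changed: Replaces A's two-pointer sweep accumulating i-j with the closed form n*(n-1)//2 minus, for each element, a binary-search count of elements <= x-k; both sort in place first.
import Mathlib
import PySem

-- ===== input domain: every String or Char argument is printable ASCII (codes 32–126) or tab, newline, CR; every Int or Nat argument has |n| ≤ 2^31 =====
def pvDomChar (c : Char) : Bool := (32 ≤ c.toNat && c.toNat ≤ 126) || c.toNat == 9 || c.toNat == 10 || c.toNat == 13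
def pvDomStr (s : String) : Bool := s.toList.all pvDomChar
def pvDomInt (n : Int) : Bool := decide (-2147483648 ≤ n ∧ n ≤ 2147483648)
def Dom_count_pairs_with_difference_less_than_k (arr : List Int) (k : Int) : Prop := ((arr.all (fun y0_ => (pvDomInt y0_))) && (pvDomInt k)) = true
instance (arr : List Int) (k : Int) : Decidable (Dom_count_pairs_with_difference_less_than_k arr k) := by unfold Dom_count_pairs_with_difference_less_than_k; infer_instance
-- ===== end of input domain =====

-- B replaces A's two-pointer sweep (which accumulates i - j with a moving pointer j) by the
-- closed form n*(n-1)//2 minus a per-element binary-search count of elements ≤ x - k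
-- (objective: alternative, same O(n log n) cost). Both Pythons sort `arr` in place; the
-- equivalence proved here is about the return value only.

-- ===== PORT A =====
-- the inner `while j < n and arr[i] - arr[j] >= k: j += 1` loop (fuel n always suffices)
def pvAdvA (a : List Int) (k x : Int) (n : Nat) : Nat → Nat → Nat
  | 0, j => j
  | fuel + 1, j =>
    if j < n then
      if x - a.getD j 0 ≥ k then pvAdvA a k x n fuel (j + 1) else j
    else j

-- one iteration of A's `for i in range(n)` body, state = (output, j)
def pvStepA (a : List Int) (k : Int) (n : Nat) (st : Int × Nat) (i : Nat) : Int × Nat :=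
  let j := pvAdvA a k (a.getD i 0) n n st.2
  (st.1 + ((i : Int) - (j : Int)), j)

def count_pairs_with_difference_less_than_k (arr : List Int) (k : Int) : Int :=
  let a := PySem.List.sorted arr (fun v => v) false
  let n := a.length
  ((List.range n).foldl (pvStepA a k n) (0, 0)).1

-- ===== PORT B =====
-- B's hand-written `while lo < hi` binary search: leftmost index whose element exceeds x
-- (fuel hi - lo, i.e. n from the top-level call, always suffices)
def pvBSearch (a : List Int) (x : Int) : Nat → Nat → Nat → Nat
  | 0, lo, _ => lo
  | fuel + 1, lo, hi =>
    if lo < hi then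
      let mid := (lo + hi) / 2
      if a.getD mid 0 ≤ x then pvBSearch a x fuel (mid + 1) hi
      else pvBSearch a x fuel lo mid
    else lo

def count_pairs_with_difference_less_than_k_alt (arr : List Int) (k : Int) : Int :=
  let a := PySem.List.sorted arr (fun v => v) false
  let n := a.length
  let below := a.foldl (fun (b : Int) x => b + (pvBSearch a (x - k) n 0 n : Int)) 0
  PySem.Int.floordiv ((n : Int) * ((n : Int) - 1)) 2 - below

-- ===== PRECONDITION & SPEC =====
def Spec_count_pairs_with_difference_less_than_k (arr : List Int) (k : Int) (out : Int) : Prop := out = count_pairs_with_difference_less_than_k_alt arr k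
instance (arr : List Int) (k : Int) (out : Int) : Decidable (Spec_count_pairs_with_difference_less_than_k arr k out) := by unfold Spec_count_pairs_with_difference_less_than_k; infer_instance

-- ===== CLAIM (what is proved, stated in full; the proofs are below) =====
def Claim_equal_count_pairs_with_difference_less_than_k : Prop := ∀ (arr : List Int) (k : Int), Dom_count_pairs_with_difference_less_than_k arr k → Spec_count_pairs_with_difference_less_than_k arr k (count_pairs_with_difference_less_than_k arr k)

-- ===== LEMMAS AND PROOFS =====

-- `IsF a x f`: f is the leftmost position of `a` whose element exceeds x (or a.length)
def IsF (a : List Int) (x : Int) (f : Nat) : Prop :=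
  f ≤ a.length ∧ (∀ i, i < f → a.getD i 0 ≤ x) ∧ (f < a.length → x < a.getD f 0)

theorem IsF_unique {a : List Int} {x : Int} {f g : Nat} (hf : IsF a x f) (hg : IsF a x g) : f = g := by
  rcases hf with ⟨hf1, hf2, hf3⟩
  rcases hg with ⟨hg1, hg2, hg3⟩
  rcases Nat.lt_trichotomy f g with h | h | h
  · have := hg2 f h
    have := hf3 (Nat.lt_of_lt_of_le h hg1)
    omega
  · exact h
  · have := hf2 g h
    have := hg3 (Nat.lt_of_lt_of_le h hf1)
    omega

theorem getD_mono {a : List Int} (hs : a.Pairwise (· ≤ ·)) {i j : Nat}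
    (hij : i ≤ j) (hj : j < a.length) : a.getD i 0 ≤ a.getD j 0 := by
  rcases Nat.lt_or_ge i j with h | h
  · rw [List.getD_eq_getElem a 0 (Nat.lt_trans h hj), List.getD_eq_getElem a 0 hj]
    exact (List.pairwise_iff_getElem.mp hs) i j _ _ h
  · have : i = j := Nat.le_antisymm hij h
    subst this; exact le_refl _

theorem pvAdvA_IsF (a : List Int) (k x : Int) (fuel : Nat) : ∀ (j : Nat),
    a.length ≤ fuel + j → j ≤ a.length → (∀ i, i < j → a.getD i 0 ≤ x - k) →
    IsF a (x - k) (pvAdvA a k x a.length fuel j) := by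
  induction fuel with
  | zero =>
    intro j hfuel hj hpre
    simp only [pvAdvA]
    exact ⟨hj, hpre, fun hc => by omega⟩
  | succ f ih =>
    intro j hfuel hj hpre
    unfold pvAdvA
    by_cases h : j < a.length
    · simp only [h, if_true]
      by_cases h2 : x - a.getD j 0 ≥ k
      · simp only [h2, if_true]
        exact ih (j + 1) (by omega) h (by
          intro i hi
          rcases Nat.lt_or_ge i j with h3 | h3
          · exact hpre i h3
          · have : i = j := by omega
            subst this; omega)
      · simp only [h2, if_false]
        exact ⟨hj, hpre, fun _ => by omega⟩
    · simp only [h, if_false]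
      exact ⟨hj, hpre, fun hc => absurd hc h⟩

theorem pvBSearch_IsF (a : List Int) (x : Int) (hs : a.Pairwise (· ≤ ·)) (fuel : Nat) :
    ∀ (lo hi : Nat),
    (∀ i, i < lo → a.getD i 0 ≤ x) →
    (∀ i, hi ≤ i → i < a.length → x < a.getD i 0) →
    lo ≤ hi → hi ≤ a.length → hi - lo ≤ fuel →
    IsF a x (pvBSearch a x fuel lo hi) := by
  induction fuel with
  | zero =>
    intro lo hi hlo hhi hle hn hf
    simp only [pvBSearch]
    exact ⟨by omega, hlo, fun hc => hhi lo (by omega) hc⟩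
  | succ f ih =>
    intro lo hi hlo hhi hle hn hf
    unfold pvBSearch
    by_cases h : lo < hi
    · simp only [h, if_true]
      by_cases h2 : a.getD ((lo + hi) / 2) 0 ≤ x
      · simp only [h2, if_true]
        exact ih ((lo + hi) / 2 + 1) hi
          (fun i hi2 => le_trans (getD_mono hs (by omega) (by omega)) h2)
          hhi (by omega) hn (by omega)
      · simp only [h2, if_false]
        exact ih lo ((lo + hi) / 2)
          hlo
          (fun i h3 h4 => lt_of_lt_of_le (by omega : x < a.getD ((lo + hi) / 2) 0)
            (getD_mono hs h3 h4))
          (by omega) (by omega) (by omega)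
    · simp only [h, if_false]
      have : lo = hi := by omega
      subst this
      exact ⟨hn, hlo, fun hc => hhi lo (le_refl _) hc⟩

-- B's per-element count, as a function of the index
def pvG (a : List Int) (k : Int) (i : Nat) : Int :=
  (pvBSearch a (a.getD i 0 - k) a.length 0 a.length : Int)

-- A's fold, written as a sum of independent per-index terms
theorem foldA_eq_sum (a : List Int) (k : Int) (hs : a.Pairwise (· ≤ ·)) :
    ∀ (cnt s j : Nat) (out : Int), s + cnt = a.length → j ≤ a.length →
      (s < a.length → ∀ i, i < j → a.getD i 0 ≤ a.getD s 0 - k) →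
      ((List.range' s cnt).foldl (pvStepA a k a.length) (out, j)).1 =
        out + ((List.range' s cnt).map (fun i : Nat => (i : Int) - pvG a k i)).sum := by
  intro cnt
  induction cnt with
  | zero => intro s j out _ _ _; simp
  | succ c ih =>
    intro s j out hsc hj hpre
    have hslt : s < a.length := by omega
    rw [List.range'_succ, List.foldl_cons, List.map_cons, List.sum_cons]
    have hA : IsF a (a.getD s 0 - k) (pvAdvA a k (a.getD s 0) a.length a.length j) :=
      pvAdvA_IsF a k (a.getD s 0) a.length j (by omega) hj (hpre hslt)
    have hB : IsF a (a.getD s 0 - k) (pvBSearch a (a.getD s 0 - k) a.length 0 a.length) :=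
      pvBSearch_IsF a (a.getD s 0 - k) hs a.length 0 a.length
        (fun i h => absurd h (Nat.not_lt_zero i)) (fun i h1 h2 => absurd h2 (by omega))
        (Nat.zero_le _) (le_refl _) (by omega)
    have hAB : pvAdvA a k (a.getD s 0) a.length a.length j = pvBSearch a (a.getD s 0 - k) a.length 0 a.length :=
      IsF_unique hA hB
    have hGs : ((pvAdvA a k (a.getD s 0) a.length a.length j : Nat) : Int) = pvG a k s := by
      rw [pvG, hAB]
    simp only [pvStepA]
    rw [hGs, hAB]
    rw [ih (s + 1) _ _ (by omega) hB.1 (fun hlt i hi => by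
      have h1 : a.getD i 0 ≤ a.getD s 0 - k := hB.2.1 i (hAB ▸ hi)
      have h2 : a.getD s 0 ≤ a.getD (s + 1) 0 := getD_mono hs (by omega) hlt
      omega)]
    ring

-- B's foldl over the elements is the sum of pvG over the indices
theorem foldB_eq_sum (a : List Int) (k : Int) :
    a.foldl (fun (b : Int) x => b + (pvBSearch a (x - k) a.length 0 a.length : Int)) 0 =
      ((List.range a.length).map (pvG a k)).sum := by
  have key : ∀ (l : List Int) (c : Int → Int) (init : Int),
      l.foldl (fun b x => b + c x) init = init + (l.map c).sum := by
    intro l c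
    induction l with
    | nil => simp
    | cons y t ih => intro init; simp [ih]; ring
  rw [key a (fun x => (pvBSearch a (x - k) a.length 0 a.length : Int)) 0, zero_add]
  congr 1
  apply List.ext_getElem
  · simp
  · intro i h1 h2
    simp only [List.getElem_map, List.getElem_range, pvG]
    rw [List.getD_eq_getElem a 0 (by simpa using h1)]

-- Gauss: twice the sum of the indices is n*(n-1)
theorem sum_range_cast (n : Nat) :
    2 * ((List.range n).map (fun i : Nat => (i : Int))).sum = (n : Int) * ((n : Int) - 1) := by
  induction n with
  | zero => simp
  | succ m ih =>
    rw [List.range_succ, List.map_append, List.sum_append]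
    push_cast
    simp only [List.map_cons, List.map_nil, List.sum_cons, List.sum_nil]
    nlinarith [ih]

-- ===== VERDICT (by name: the statement is the Claim_ definition above) =====
theorem count_pairs_with_difference_less_than_k_spec : Claim_equal_count_pairs_with_difference_less_than_k := by
  intro arr k _
  unfold Spec_count_pairs_with_difference_less_than_k
  unfold count_pairs_with_difference_less_than_k count_pairs_with_difference_less_than_k_alt
  set a := PySem.List.sorted arr (fun v => v) false with ha
  have hs : a.Pairwise (· ≤ ·) := PySem.List.sorted_pairwise arr (fun v => v)
  simp only [List.range_eq_range']
  rw [foldA_eq_sum a k hs a.length 0 0 0 (by omega) (Nat.zero_le _)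
    (fun _ i hi => absurd hi (Nat.not_lt_zero i))]
  rw [← List.range_eq_range', foldB_eq_sum a k]
  have hsplit : ((List.range a.length).map (fun i : Nat => (i : Int) - pvG a k i)).sum =
      ((List.range a.length).map (fun i : Nat => (i : Int))).sum -
        ((List.range a.length).map (pvG a k)).sum := by
    induction (List.range a.length) with
    | nil => simp
    | cons y t ih => simp [ih]; ring
  have hfd : PySem.Int.floordiv ((a.length : Int) * ((a.length : Int) - 1)) 2 =
      ((List.range a.length).map (fun i : Nat => (i : Int))).sum := by
    rw [← sum_range_cast a.length, PySem.Int.floordiv_eq_ediv_of_pos (by omega)]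
    omega
  rw [hsplit, hfd]
  ring
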